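-- pv_equiv track=rewrite | github.com/Rightscar/crs2 | modules/testing_support.py | _generate_dialogue_content
-- ===== SOURCE A (Python) =====
-- def _generate_dialogue_content(length: int) -> str:
--     """Generate dialogue style test content"""
--     dialogue_lines = [
--         'Teacher: "Welcome to our discussion on consciousness."',
--         'Student: "I\'m curious about the nature of awareness."',
--         'Teacher: "Awareness is like a mirror that reflects all experiences."',
--         'Student: "How can we develop deeper awareness?"',
--         'Teacher: "Through practice and patient observation."',
--     ]
--
--     content = []
--     current_length = 0
--
--     while current_length < length:
--         for line in dialogue_lines:
--             content.append(line)
--             current_length += len(line) + 1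
--
--             if current_length >= length:
--                 break
--
--     return "\n".join(content)
-- ===== SOURCE B (Python) =====
-- def _generate_dialogue_content(length: int) -> str:
--     """Generate dialogue style test content"""
--     dialogue_lines = [
--         'Teacher: "Welcome to our discussion on consciousness."',
--         'Student: "I\'m curious about the nature of awareness."',
--         'Teacher: "Awareness is like a mirror that reflects all experiences."',
--         'Student: "How can we develop deeper awareness?"',
--         'Teacher: "Through practice and patient observation."',
--     ]
--
--     if length <= 0:
--         return ""
--
--     weights = [len(line) + 1 for line in dialogue_lines]
--     total = sum(weights)
--
--     # whole cycles completed strictly before the stopping line, then the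
--     # smallest j whose cumulative weight reaches the remainder
--     cycles = (length - 1) // total
--     remainder = length - cycles * total  # 1 <= remainder <= total
--     acc = 0
--     j = 0
--     for w in weights:
--         j += 1
--         acc += w
--         if acc >= remainder:
--             break
--
--     k = len(dialogue_lines) * cycles + j
--     return "\n".join((dialogue_lines * (cycles + 1))[:k])
-- ===== Notes on version B (the rewrite author's own statement) =====
-- stated objective: alternative
-- what changed: B replaces A's while/for append loop by arithmetic: it computes the number of full cycles with integer division and the stopping line inside the last cycle from the cumulative weights, then materializes the result in one step by slicing the repeated line list and joining once.
import Mathlib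
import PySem

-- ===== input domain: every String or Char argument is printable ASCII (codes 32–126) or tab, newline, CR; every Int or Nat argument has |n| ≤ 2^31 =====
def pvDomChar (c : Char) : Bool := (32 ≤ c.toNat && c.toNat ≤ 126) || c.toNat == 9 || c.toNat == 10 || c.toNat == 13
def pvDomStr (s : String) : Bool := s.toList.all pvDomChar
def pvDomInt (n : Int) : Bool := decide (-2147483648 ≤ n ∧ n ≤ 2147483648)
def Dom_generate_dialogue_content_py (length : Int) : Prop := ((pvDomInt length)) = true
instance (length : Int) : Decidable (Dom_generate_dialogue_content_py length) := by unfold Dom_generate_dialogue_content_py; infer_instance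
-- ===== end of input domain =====

-- B replaces A's append-as-you-go loop by a count phase (cycles by integer division,
-- stopping line from cumulative weights) and a single slice-and-join materialize phase.

def pvLines : List String := [
  "Teacher: \"Welcome to our discussion on consciousness.\"",
  "Student: \"I'm curious about the nature of awareness.\"",
  "Teacher: \"Awareness is like a mirror that reflects all experiences.\"",
  "Student: \"How can we develop deeper awareness?\"",
  "Teacher: \"Through practice and patient observation.\""]

-- ===== PORT A =====
-- the inner 'for line in dialogue_lines: … if current_length >= length: break'
def pvInnerA (length : Int) : List String → List String → Int → List String × Int
  | [], content, cur => (content, cur)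
  | l :: rest, content, cur =>
      let content := content ++ [l]
      let cur := cur + (PySem.Str.len l + 1)
      if cur ≥ length then (content, cur) else pvInnerA length rest content cur

theorem pvStrLen_nonneg (s : String) : 0 ≤ PySem.Str.len s := by
  simp [PySem.Str.len_eq]

theorem pvInnerA_le (length : Int) (ls : List String) : ∀ (content : List String) (cur : Int),
    cur ≤ (pvInnerA length ls content cur).2 := by
  induction ls with
  | nil => intro content cur; simp [pvInnerA]
  | cons l rest ih =>
      intro content cur
      simp only [pvInnerA]
      split
      · simp; have := pvStrLen_nonneg l; omega
      · have := ih (content ++ [l]) (cur + (PySem.Str.len l + 1))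
        have := pvStrLen_nonneg l; omega

theorem pvInnerA_lt (length : Int) (l : String) (rest content : List String) (cur : Int) :
    cur < (pvInnerA length (l :: rest) content cur).2 := by
  have hw := pvStrLen_nonneg l
  simp only [pvInnerA]
  split
  · simp only
    omega
  · have h := pvInnerA_le length rest (content ++ [l]) (cur + (PySem.Str.len l + 1))
    omega

theorem pvInnerA_lt_lines (length : Int) (content : List String) (cur : Int) :
    cur < (pvInnerA length pvLines content cur).2 := by
  simp only [pvLines]
  exact pvInnerA_lt length _ _ content cur

-- the outer 'while current_length < length' (break re-checks the while condition)
def pvOuterA (length : Int) (content : List String) (cur : Int) : List String :=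
  if cur < length then
    let p := pvInnerA length pvLines content cur
    pvOuterA length p.1 p.2
  else content
termination_by (length - cur).toNat
decreasing_by
  have := pvInnerA_lt_lines length content cur
  omega

def generate_dialogue_content_py (length : Int) : String :=
  PySem.Str.join "\n" (pvOuterA length [] 0)

-- ===== PORT B =====
-- count phase: smallest j with cumulative weight ≥ remainder (the for/break over weights)
def pvCountB (remainder : Int) : List Int → Int → Int → Int
  | [], _, j => j
  | w :: ws, acc, j =>
      let j := j + 1
      let acc := acc + w
      if acc ≥ remainder then j else pvCountB remainder ws acc j

def generate_dialogue_content_py_alt (length : Int) : String :=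
  if length ≤ 0 then "" else
  let weights := pvLines.map (fun l => PySem.Str.len l + 1)
  let total := weights.sum
  let cycles := PySem.Int.floordiv (length - 1) total
  let remainder := length - cycles * total
  let j := pvCountB remainder weights 0 0
  let k := (pvLines.length : Int) * cycles + j
  PySem.Str.join "\n" (PySem.List.slice ((List.replicate (cycles + 1).toNat pvLines).flatten) none (some k))

-- ===== PRECONDITION & SPEC =====
def Spec_generate_dialogue_content_py (length : Int) (out : String) : Prop := out = generate_dialogue_content_py_alt length
instance (length : Int) (out : String) : Decidable (Spec_generate_dialogue_content_py length out) := by unfold Spec_generate_dialogue_content_py; infer_instance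

-- ===== CLAIM (what is proved, stated in full; the proofs are below) =====
def Claim_equal_generate_dialogue_content_py : Prop := ∀ (length : Int), Dom_generate_dialogue_content_py length → Spec_generate_dialogue_content_py length (generate_dialogue_content_py length)

-- ===== LEMMAS AND PROOFS =====

-- the result list that B's port materializes (proof-side restatement of B's body)
def pvBList (length : Int) : List String :=
  let cycles := PySem.Int.floordiv (length - 1) 279
  let remainder := length - cycles * 279
  let j := pvCountB remainder [55, 54, 69, 48, 53] 0 0
  PySem.List.slice ((List.replicate (cycles + 1).toNat pvLines).flatten) none (some (5 * cycles + j))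

theorem pvWeights_eval : pvLines.map (fun l => PySem.Str.len l + 1) = [55, 54, 69, 48, 53] := by
  decide

theorem pvAlt_eq (length : Int) (h : ¬ length ≤ 0) :
    generate_dialogue_content_py_alt length = PySem.Str.join "\n" (pvBList length) := by
  rw [generate_dialogue_content_py_alt, if_neg h, pvBList]
  rw [pvWeights_eval]
  norm_num [pvLines]

-- inner-pass shift: starting content/cur only offset the result
theorem pvInnerA_shift (ls : List String) : ∀ (content : List String) (cur length : Int),
    pvInnerA length ls content cur =
      (content ++ (pvInnerA (length - cur) ls [] 0).1,
       cur + (pvInnerA (length - cur) ls [] 0).2) := by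
  induction ls with
  | nil => intro content cur length; simp [pvInnerA]
  | cons l rest ih =>
      intro content cur length
      simp only [pvInnerA]
      by_cases h : cur + (PySem.Str.len l + 1) ≥ length
      · rw [if_pos h, if_pos (by omega : 0 + (PySem.Str.len l + 1) ≥ length - cur)]
        simp
      · rw [if_neg h, if_neg (by omega : ¬ 0 + (PySem.Str.len l + 1) ≥ length - cur)]
        rw [ih (content ++ [l]) (cur + (PySem.Str.len l + 1)) length,
            ih ([] ++ [l]) (0 + (PySem.Str.len l + 1)) (length - cur)]
        rw [show length - cur - (0 + (PySem.Str.len l + 1)) = length - (cur + (PySem.Str.len l + 1)) from by ring]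
        refine Prod.ext ?_ ?_
        · simp
        · simp only []
          omega

-- outer-loop shift
theorem pvOuterA_shift : ∀ (n : Nat) (length : Int) (content : List String) (cur : Int),
    (length - cur).toNat ≤ n →
    pvOuterA length content cur = content ++ pvOuterA (length - cur) [] 0 := by
  intro n
  induction n with
  | zero =>
      intro length content cur hn
      rw [pvOuterA, if_neg (by omega), pvOuterA, if_neg (by omega)]
      simp
  | succ n ih =>
      intro length content cur hn
      by_cases hc : cur < length
      · have hpos := pvInnerA_lt_lines (length - cur) ([] : List String) 0
        rw [pvOuterA, if_pos hc]
        simp only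
        rw [pvInnerA_shift pvLines content cur length]
        rw [ih length (content ++ (pvInnerA (length - cur) pvLines [] 0).1)
              (cur + (pvInnerA (length - cur) pvLines [] 0).2) (by omega)]
        rw [show length - (cur + (pvInnerA (length - cur) pvLines [] 0).2)
            = (length - cur) - (pvInnerA (length - cur) pvLines [] 0).2 from by ring]
        conv_rhs => rw [pvOuterA, if_pos (by omega : (0:Int) < length - cur)]
        simp only
        rw [ih (length - cur) ((pvInnerA (length - cur) pvLines [] 0).1)
              ((pvInnerA (length - cur) pvLines [] 0).2) (by omega)]
        simp
      · rw [pvOuterA, if_neg hc, pvOuterA, if_neg (by omega)]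
        simp

-- the five literal line lengths
theorem pvL1 : PySem.Str.len "Teacher: \"Welcome to our discussion on consciousness.\"" = 54 := by decide
theorem pvL2 : PySem.Str.len "Student: \"I'm curious about the nature of awareness.\"" = 53 := by decide
theorem pvL3 : PySem.Str.len "Teacher: \"Awareness is like a mirror that reflects all experiences.\"" = 68 := by decide
theorem pvL4 : PySem.Str.len "Student: \"How can we develop deeper awareness?\"" = 47 := by decide
theorem pvL5 : PySem.Str.len "Teacher: \"Through practice and patient observation.\"" = 52 := by decide

-- per-segment evaluation of the inner pass from a fresh start
theorem pvInner1 (r : Int) (h : r ≤ 55) : pvInnerA r pvLines [] 0 = (pvLines.take 1, 55) := by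
  simp only [pvInnerA, pvLines, pvL1, pvL2, pvL3, pvL4, pvL5]
  split_ifs <;> first | decide | (exfalso; omega)

theorem pvInner2 (r : Int) (h1 : 55 < r) (h2 : r ≤ 109) : pvInnerA r pvLines [] 0 = (pvLines.take 2, 109) := by
  simp only [pvInnerA, pvLines, pvL1, pvL2, pvL3, pvL4, pvL5]
  split_ifs <;> first | decide | (exfalso; omega)

theorem pvInner3 (r : Int) (h1 : 109 < r) (h2 : r ≤ 178) : pvInnerA r pvLines [] 0 = (pvLines.take 3, 178) := by
  simp only [pvInnerA, pvLines, pvL1, pvL2, pvL3, pvL4, pvL5]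
  split_ifs <;> first | decide | (exfalso; omega)

theorem pvInner4 (r : Int) (h1 : 178 < r) (h2 : r ≤ 226) : pvInnerA r pvLines [] 0 = (pvLines.take 4, 226) := by
  simp only [pvInnerA, pvLines, pvL1, pvL2, pvL3, pvL4, pvL5]
  split_ifs <;> first | decide | (exfalso; omega)

theorem pvInner5 (r : Int) (h1 : 226 < r) : pvInnerA r pvLines [] 0 = (pvLines, 279) := by
  simp only [pvInnerA, pvLines, pvL1, pvL2, pvL3, pvL4, pvL5]
  split_ifs <;> first | decide | (exfalso; omega)

-- per-segment evaluation of B's count loop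
theorem pvCount1 (r : Int) (h : r ≤ 55) : pvCountB r [55, 54, 69, 48, 53] 0 0 = 1 := by
  simp only [pvCountB]; split_ifs <;> omega

theorem pvCount2 (r : Int) (h1 : 55 < r) (h2 : r ≤ 109) : pvCountB r [55, 54, 69, 48, 53] 0 0 = 2 := by
  simp only [pvCountB]; split_ifs <;> omega

theorem pvCount3 (r : Int) (h1 : 109 < r) (h2 : r ≤ 178) : pvCountB r [55, 54, 69, 48, 53] 0 0 = 3 := by
  simp only [pvCountB]; split_ifs <;> omega

theorem pvCount4 (r : Int) (h1 : 178 < r) (h2 : r ≤ 226) : pvCountB r [55, 54, 69, 48, 53] 0 0 = 4 := by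
  simp only [pvCountB]; split_ifs <;> omega

theorem pvCount5 (r : Int) (h1 : 226 < r) : pvCountB r [55, 54, 69, 48, 53] 0 0 = 5 := by
  simp only [pvCountB]; split_ifs <;> omega

theorem pvCountB_bounds (r : Int) : 1 ≤ pvCountB r [55, 54, 69, 48, 53] 0 0 ∧ pvCountB r [55, 54, 69, 48, 53] 0 0 ≤ 5 := by
  simp only [pvCountB]; split_ifs <;> omega

-- base case: 0 < length ≤ 279 means zero full cycles
theorem pvMain_base (length : Int) (h0 : 0 < length) (h279 : length ≤ 279) :
    pvOuterA length [] 0 = pvBList length := by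
  have hc : PySem.Int.floordiv (length - 1) 279 = 0 := by
    rw [PySem.Int.floordiv_eq_iff_of_pos (by norm_num)]
    omega
  simp only [pvBList, hc]
  rw [show length - 0 * 279 = length from by ring]
  rw [pvOuterA, if_pos (by omega : (0:Int) < length)]
  simp only
  rcases lt_or_ge 55 length with h1 | h1
  · rcases lt_or_ge 109 length with h2 | h2
    · rcases lt_or_ge 178 length with h3 | h3
      · rcases lt_or_ge 226 length with h4 | h4
        · rw [pvInner5 length h4, pvOuterA, if_neg (by omega), pvCount5 length h4]
          decide
        · rw [pvInner4 length h3 h4, pvOuterA, if_neg (by omega), pvCount4 length h3 h4]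
          decide
      · rw [pvInner3 length h2 h3, pvOuterA, if_neg (by omega), pvCount3 length h2 h3]
        decide
    · rw [pvInner2 length h1 h2, pvOuterA, if_neg (by omega), pvCount2 length h1 h2]
      decide
  · rw [pvInner1 length h1, pvOuterA, if_neg (by omega), pvCount1 length h1]
    decide

theorem pvSliceTake {α : Type} (xs : List α) (k : Int) (hk : 0 ≤ k) :
    PySem.List.slice xs none (some k) = xs.take k.toNat := by
  rw [show k = ((k.toNat : Nat) : Int) from by omega, PySem.List.slice_to_natCast]
  simp
  omega

-- step: one more full cycle on the B side
theorem pvBList_step (length : Int) (h : 279 < length) :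
    pvBList length = pvLines ++ pvBList (length - 279) := by
  have hq : PySem.Int.floordiv (length - 279 - 1) 279 * 279 ≤ length - 280 ∧
      length - 280 < (PySem.Int.floordiv (length - 279 - 1) 279 + 1) * 279 := by
    have := (PySem.Int.floordiv_eq_iff_of_pos (a := length - 279 - 1) (b := 279) (q := PySem.Int.floordiv (length - 279 - 1) 279) (by norm_num)).mp rfl
    omega
  set q := PySem.Int.floordiv (length - 279 - 1) 279 with hqdef
  have hq0 : 0 ≤ q := by omega
  have hc : PySem.Int.floordiv (length - 1) 279 = q + 1 := by
    rw [PySem.Int.floordiv_eq_iff_of_pos (by norm_num)]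
    omega
  have hb := pvCountB_bounds (length - 279 - q * 279)
  simp only [pvBList, hc]
  rw [← hqdef]
  rw [show length - (q + 1) * 279 = length - 279 - q * 279 from by ring]
  rw [show (q + 1 + 1).toNat = (q + 1).toNat + 1 from by omega]
  rw [List.replicate_succ, List.flatten_cons]
  rw [pvSliceTake _ _ (by omega), pvSliceTake _ _ (by omega)]
  rw [List.take_append]
  rw [List.take_of_length_le (l := pvLines)
    (by simp only [pvLines, List.length_cons, List.length_nil]; omega)]
  congr 1
  congr 1
  simp only [pvLines, List.length_cons, List.length_nil]
  omega

theorem pvMain : ∀ (n : Nat) (length : Int), length.toNat ≤ n → 0 < length →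
    pvOuterA length [] 0 = pvBList length := by
  intro n
  induction n with
  | zero => intro length hn h0; exfalso; omega
  | succ n ih =>
      intro length hn h0
      by_cases h : length ≤ 279
      · exact pvMain_base length h0 h
      · rw [not_le] at h
        rw [pvOuterA, if_pos (by omega : (0:Int) < length)]
        simp only
        rw [show pvInnerA length pvLines [] 0 = (pvLines, 279) from by
          have h5 := pvInner5 length (by omega)
          simpa using h5]
        rw [pvOuterA_shift (length - 279).toNat length pvLines 279 (by omega)]
        rw [ih (length - 279) (by omega) (by omega)]
        rw [pvBList_step length h]

-- ===== VERDICT (by name: the statement is the Claim_ definition above) =====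
theorem generate_dialogue_content_py_spec : Claim_equal_generate_dialogue_content_py := by
  intro length _
  unfold Spec_generate_dialogue_content_py generate_dialogue_content_py
  by_cases h : length ≤ 0
  · rw [generate_dialogue_content_py_alt, if_pos h, pvOuterA, if_neg (by omega)]
    decide
  · rw [pvAlt_eq length h, pvMain length.toNat length le_rfl (by omega)]
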